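-- pv_equiv track=rewrite | github.com/KateFedkova/CDM_Labs | Lab_5.py | graph_information_extractor
-- ===== SOURCE A (Python) =====
-- def graph_information_extractor(graph_data):
--     x_intercepts = []
--     y_intercepts = None
--     maxima = []
--     minima = []
--
--     for i in range(0, len(graph_data) - 1):
--         if graph_data[i][0] == 0:
--             y_intercepts = graph_data[i][1]
--         if graph_data[i][1] == 0:
--             x_intercepts.append(graph_data[i][0])
--         if i != 0 and graph_data[i - 1][1] < graph_data[i][1] > graph_data[i + 1][1]:
--             maxima.append(graph_data[i][1])
--         elif i != 0 and graph_data[i - 1][1] > graph_data[i][1] < graph_data[i + 1][1]: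
--             minima.append(graph_data[i][1])
--
--     return f"""x-intercepts: {None if len(x_intercepts) == 0 else x_intercepts}\ny-intercepts: {y_intercepts}
-- Maxima: {None if len(maxima) == 0 else maxima}\nMinima: {None if len(minima) == 0 else minima}"""
-- ===== SOURCE B (Python) =====
-- def graph_information_extractor(graph_data):
--     body = graph_data[:-1]
--     x_list = [x for x, y in body if y == 0]
--     y_int = next((y for x, y in reversed(body) if x == 0), None)
--     # derivative signs: +1 rising, -1 falling, 0 flat, between consecutive points
--     sgn = [(b > a) - (b < a) for (_, a), (_, b) in zip(graph_data, graph_data[1:])]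
--     maxima = []
--     minima = []
--     for s1, s2, (_, y) in zip(sgn, sgn[1:], graph_data[1:]):
--         if s1 == 1 and s2 == -1:
--             maxima.append(y)
--         elif s1 == -1 and s2 == 1:
--             minima.append(y)
--     return (f"x-intercepts: {x_list or None}\ny-intercepts: {y_int}\n"
--             f"Maxima: {maxima or None}\nMinima: {minima or None}")
-- ===== Notes on version B (the rewrite author's own statement) =====
-- stated objective: alternative
-- what changed: Replaces A's single index loop with i-1/i/i+1 neighbor comparisons by a staged derivative-sign algorithm: precompute the list of signs of consecutive y-differences, classify extrema purely by (+,-)/(-,+) sign transitions, and find the y-intercept as the first x==0 match of the reversed prefix instead of last-overwrite.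
import Mathlib
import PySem

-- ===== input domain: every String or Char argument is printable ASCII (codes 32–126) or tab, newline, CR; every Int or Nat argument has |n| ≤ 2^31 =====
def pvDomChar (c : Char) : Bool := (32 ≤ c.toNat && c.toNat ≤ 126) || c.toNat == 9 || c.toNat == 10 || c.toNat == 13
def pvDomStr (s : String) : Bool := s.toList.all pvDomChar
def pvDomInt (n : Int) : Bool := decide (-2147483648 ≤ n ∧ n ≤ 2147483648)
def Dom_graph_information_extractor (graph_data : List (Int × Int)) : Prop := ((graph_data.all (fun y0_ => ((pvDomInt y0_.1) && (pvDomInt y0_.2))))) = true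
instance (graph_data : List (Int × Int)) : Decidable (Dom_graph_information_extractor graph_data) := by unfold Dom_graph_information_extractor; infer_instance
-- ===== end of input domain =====

-- B replaces A's single indexed neighbor-comparison loop by a staged derivative-sign algorithm
-- (sign list of consecutive y-differences, extrema = sign transitions, y-intercept = first
-- x==0 match of the reversed prefix); objective: alternative decomposition, same cost.
-- Both ports share pvRender: the identical f-string of both Pythons (Python list repr / None).

-- Python repr of a list of ints, with the `None if empty` substitution of the f-string
def pvListRepr (xs : List Int) : List Char :=
  if xs.isEmpty then "None".toList
  else '[' :: PySem.Chars.join (", ".toList) (xs.map PySem.Int.toChars) ++ [']']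

def pvOptRepr (o : Option Int) : List Char :=
  match o with
  | none => "None".toList
  | some n => PySem.Int.toChars n

-- the f-string (identical in A and in B)
def pvRender (xi : List Int) (yi : Option Int) (mx mn : List Int) : String :=
  String.ofList ("x-intercepts: ".toList ++ pvListRepr xi ++ "\ny-intercepts: ".toList ++ pvOptRepr yi
    ++ "\nMaxima: ".toList ++ pvListRepr mx ++ "\nMinima: ".toList ++ pvListRepr mn)

-- ===== PORT A =====
-- A's loop body at index i; the pyGet? at i-1 / i+1 are guarded by `i ≠ 0` exactly as Python's
-- short-circuit `and` guards them (indices in range whenever the guard is reached).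
def pvStepA (g : List (Int × Int)) (st : List Int × Option Int × List Int × List Int) (i : Int) :
    List Int × Option Int × List Int × List Int :=
  let p  := (PySem.List.pyGet? g i).getD (0, 0)
  let pm := (PySem.List.pyGet? g (i - 1)).getD (0, 0)
  let pp := (PySem.List.pyGet? g (i + 1)).getD (0, 0)
  let yi := if p.1 == 0 then some p.2 else st.2.1
  let xi := if p.2 == 0 then st.1 ++ [p.1] else st.1
  if i ≠ 0 ∧ pm.2 < p.2 ∧ pp.2 < p.2 then (xi, yi, st.2.2.1 ++ [p.2], st.2.2.2)
  else if i ≠ 0 ∧ pm.2 > p.2 ∧ pp.2 > p.2 then (xi, yi, st.2.2.1, st.2.2.2 ++ [p.2])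
  else (xi, yi, st.2.2.1, st.2.2.2)

def graph_information_extractor (graph_data : List (Int × Int)) : String :=
  let st := (PySem.List.pyRange 0 ((graph_data.length : Int) - 1)).foldl (pvStepA graph_data)
      ([], none, [], [])
  pvRender st.1 st.2.1 st.2.2.1 st.2.2.2

-- ===== PORT B =====
-- Python's `(b > a) - (b < a)`
def pvSign (a b : Int) : Int := (if b > a then 1 else 0) - (if b < a then 1 else 0)

-- Source B's sgn list: signs of consecutive y-differences
def pvSigns (g : List (Int × Int)) : List Int :=
  (g.zip (g.drop 1)).map (fun t => pvSign t.1.2 t.2.2)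

-- Source B's zip(sgn, sgn[1:], graph_data[1:])
def pvTriB (g : List (Int × Int)) : List ((Int × Int) × (Int × Int)) :=
  ((pvSigns g).zip ((pvSigns g).drop 1)).zip (g.drop 1)

-- Source B's extrema loop body over one ((s1, s2), point) element
def pvStepB (st : List Int × List Int) (t : (Int × Int) × (Int × Int)) : List Int × List Int :=
  if t.1.1 = 1 ∧ t.1.2 = -1 then (st.1 ++ [t.2.2], st.2)
  else if t.1.1 = -1 ∧ t.1.2 = 1 then (st.1, st.2 ++ [t.2.2])
  else st

def graph_information_extractor_alt (graph_data : List (Int × Int)) : String :=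
  let body := graph_data.dropLast
  let xList := (body.filter (fun p => p.2 == 0)).map Prod.fst
  let yInt := (body.reverse.find? (fun p => p.1 == 0)).map Prod.snd
  let mm := (pvTriB graph_data).foldl pvStepB ([], [])
  pvRender xList yInt mm.1 mm.2

-- ===== PRECONDITION & SPEC =====
def Spec_graph_information_extractor (graph_data : List (Int × Int)) (out : String) : Prop := out = graph_information_extractor_alt graph_data
instance (graph_data : List (Int × Int)) (out : String) : Decidable (Spec_graph_information_extractor graph_data out) := by unfold Spec_graph_information_extractor; infer_instance

-- ===== CLAIM (what is proved, stated in full; the proofs are below) =====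
def Claim_equal_graph_information_extractor : Prop := ∀ (graph_data : List (Int × Int)), Dom_graph_information_extractor graph_data → Spec_graph_information_extractor graph_data (graph_information_extractor graph_data)

-- ===== LEMMAS AND PROOFS =====

theorem pvSign_eq_one (a b : Int) : pvSign a b = 1 ↔ a < b := by
  unfold pvSign; split_ifs <;> omega

theorem pvSign_eq_neg_one (a b : Int) : pvSign a b = -1 ↔ b < a := by
  unfold pvSign; split_ifs <;> omega

theorem pvSigns_length (g : List (Int × Int)) : (pvSigns g).length = g.length - 1 := by
  simp [pvSigns]

theorem pvSigns_getElem (g : List (Int × Int)) (k : Nat) (hk : k + 1 < g.length) :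
    (pvSigns g)[k]'(by rw [pvSigns_length]; omega) =
      pvSign (g[k]'(by omega)).2 (g[k + 1]'hk).2 := by
  simp [pvSigns]

theorem pvTriB_length (g : List (Int × Int)) : (pvTriB g).length = g.length - 2 := by
  simp [pvTriB, pvSigns_length]; omega

theorem pvTriB_getElem (g : List (Int × Int)) (k : Nat) (hk : k + 2 < g.length) :
    (pvTriB g)[k]'(by rw [pvTriB_length]; omega) =
      ((pvSign (g[k]'(by omega)).2 (g[k + 1]'(by omega)).2,
        pvSign (g[k + 1]'(by omega)).2 (g[k + 2]'hk).2), g[k + 1]'(by omega)) := by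
  simp only [pvTriB, List.getElem_zip, List.getElem_drop, Nat.add_comm 1 k]
  rw [pvSigns_getElem g k (by omega), pvSigns_getElem g (k + 1) hk]

-- last match of a filter = first match on the reverse (B's reversed-search y-intercept)
theorem pvLast_filter_find? (l : List (Int × Int)) (p : Int × Int → Bool) :
    ((l.filter p).map Prod.snd).getLast? = (l.reverse.find? p).map Prod.snd := by
  rw [List.getLast?_eq_head?_reverse, ← List.map_reverse, ← List.filter_reverse,
    List.head?_map, List.head?_filter]

-- loop invariant: after A has processed indices 0 .. m-1, its state is B's components on prefixes
theorem pvInvariant (g : List (Int × Int)) (m : Nat) (hm : m + 1 ≤ g.length) :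
    (PySem.List.pyRange 0 (m : Int)).foldl (pvStepA g) ([], none, [], []) =
      (((g.take m).filter (fun p => p.2 == 0)).map Prod.fst,
       (((g.take m).filter (fun p => p.1 == 0)).map Prod.snd).getLast?,
       ((pvTriB g).take (m - 1)).foldl pvStepB ([], [])) := by
  induction m with
  | zero => simp [PySem.List.pyRange]
  | succ m ih =>
    rw [show ((m + 1 : Nat) : Int) = (m : Int) + 1 by push_cast; ring,
      PySem.List.pyRange_one_succ_right (by positivity), List.foldl_append,
      ih (by omega)]
    have hget : ∀ (k : Nat) (hk : k < g.length),
        (PySem.List.pyGet? g ((k : Nat) : Int)).getD (0, 0) = g[k]'hk := by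
      intro k hk
      rw [PySem.List.pyGet?_natCast]
      simp [hk]
    match m, hm with
    | 0, hm =>
      simp only [List.foldl_cons, List.foldl_nil, pvStepA, hget 0 (by omega)]
      norm_num
      rw [List.take_add_one, List.getElem?_eq_getElem (show 0 < g.length by omega)]
      split_ifs <;> simp_all
    | (k+1), hm =>
      have h2 : k + 2 < g.length := by omega
      have e1 : (((k + 1 : Nat) : Int) - 1) = ((k : Nat) : Int) := by push_cast; ring
      have e2 : (((k + 1 : Nat) : Int) + 1) = ((k + 2 : Nat) : Int) := by push_cast; ring
      simp only [List.foldl_cons, List.foldl_nil, pvStepA, e1, e2,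
        hget (k+1) (by omega), hget k (by omega), hget (k+2) h2]
      have htk : (pvTriB g).take (k + 1) = (pvTriB g).take k ++
          [((pvSign (g[k]'(by omega)).2 (g[k+1]'(by omega)).2,
             pvSign (g[k+1]'(by omega)).2 (g[k+2]'h2).2), g[k+1]'(by omega))] := by
        rw [List.take_add_one, List.getElem?_eq_getElem (by rw [pvTriB_length]; omega),
          pvTriB_getElem g k h2]
        rfl
      have hx : g.take (k + 2) = g.take (k + 1) ++ [g[k+1]'(by omega)] := by
        rw [List.take_add_one, List.getElem?_eq_getElem (by omega)]
        rfl
      rw [show k + 1 + 1 - 1 = k + 1 by omega, show k + 1 - 1 = k by omega, htk,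
        List.foldl_append, hx]
      simp only [List.foldl_cons, List.foldl_nil, pvStepB, List.filter_append, List.map_append,
        pvSign_eq_one, pvSign_eq_neg_one]
      by_cases c1 : g[k].2 < g[k+1].2 ∧ g[k+2].2 < g[k+1].2
      · rw [if_pos (And.intro (show ((k+1 : Nat) : Int) ≠ 0 by omega) c1), if_pos c1]
        split_ifs <;> simp_all [Prod.ext_iff, List.getLast?_append]
      · rw [if_neg (fun h => c1 ⟨h.2.1, h.2.2⟩), if_neg c1]
        by_cases c2 : g[k].2 > g[k+1].2 ∧ g[k+2].2 > g[k+1].2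
        · rw [if_pos (And.intro (show ((k+1 : Nat) : Int) ≠ 0 by omega) c2),
            if_pos (And.intro c2.1 c2.2)]
          split_ifs <;> simp_all [Prod.ext_iff, List.getLast?_append]
        · rw [if_neg (fun h => c2 ⟨h.2.1, h.2.2⟩),
            if_neg (show ¬((g[k+1]'(by omega)).2 < (g[k]'(by omega)).2 ∧
              (g[k+1]'(by omega)).2 < (g[k+2]'h2).2) from fun h => c2 ⟨h.1, h.2⟩)]
          split_ifs <;> simp_all [Prod.ext_iff, List.getLast?_append]

-- ===== VERDICT (by name: the statement is the Claim_ definition above) =====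
theorem graph_information_extractor_spec : Claim_equal_graph_information_extractor := by
  intro g _
  show graph_information_extractor g = graph_information_extractor_alt g
  match hg : g with
  | [] => rfl
  | p :: rest =>
    have hcast : ((p :: rest).length : Int) - 1 = (((p :: rest).length - 1 : Nat) : Int) := by
      simp
    unfold graph_information_extractor graph_information_extractor_alt
    rw [hcast, pvInvariant (p :: rest) ((p :: rest).length - 1) (by omega)]
    have h1 : (p :: rest).take ((p :: rest).length - 1) = (p :: rest).dropLast :=
      List.dropLast_eq_take.symm
    have h2 : (pvTriB (p :: rest)).take ((p :: rest).length - 1 - 1) = pvTriB (p :: rest) := by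
      apply List.take_of_length_le
      rw [pvTriB_length]; omega
    rw [h1, h2, pvLast_filter_find?]
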